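-- pv_equiv track=rewrite | github.com/Salmandaneshfar/flask-cmd-itops | scripts/import_servers_from_excel.py | build_column_map
-- ===== SOURCE A (Python) =====
-- from typing import Dict, List, Optional
--
-- REQUIRED_COLUMNS = [
-- 	"name",
-- 	"ip_address",
-- 	"os_type",
-- 	"status",
-- ]
--
-- def normalize_columns(columns: List[str]) -> List[str]:
-- 	"""Lowercase and strip spaces/underscores for matching."""
-- 	return [
-- 		c.strip().lower().replace(" ", "_") if isinstance(c, str) else c for c in columns
-- 	]
--
-- def build_column_map(headers: List[str]) -> Dict[str, str]:
-- 	"""Map required logical names to actual dataframe column names (case-insensitive)."""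
-- 	normalized = normalize_columns(headers)
-- 	actual_by_norm = {n: orig for n, orig in zip(normalized, headers)}
-- 	col_map: Dict[str, str] = {}
-- 	for req in REQUIRED_COLUMNS:
-- 		if req in actual_by_norm:
-- 			col_map[req] = actual_by_norm[req]
-- 	return col_map
-- ===== SOURCE B (Python) =====
-- from typing import Dict, List
--
-- REQUIRED_COLUMNS = [
--     "name",
--     "ip_address",
--     "os_type",
--     "status",
-- ]
--
-- def build_column_map(headers: List[str]) -> Dict[str, str]:
--     """Map required logical names to actual dataframe column names (case-insensitive)."""
--     col_map: Dict[str, str] = {}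
--     for req in REQUIRED_COLUMNS:
--         found = None
--         for h in headers:
--             n = h.strip().lower().replace(" ", "_") if isinstance(h, str) else h
--             if n == req:
--                 found = h  # keep scanning: last occurrence wins, like dict building in A
--         if found is not None:
--             col_map[req] = found
--     return col_map
-- ===== Notes on version B (the rewrite author's own statement) =====
-- stated objective: simpler
-- what changed: Drops the intermediate normalized-to-original index dict entirely: for each required column B scans the headers directly, keeping the last header whose normalized form matches.
import Mathlib
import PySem

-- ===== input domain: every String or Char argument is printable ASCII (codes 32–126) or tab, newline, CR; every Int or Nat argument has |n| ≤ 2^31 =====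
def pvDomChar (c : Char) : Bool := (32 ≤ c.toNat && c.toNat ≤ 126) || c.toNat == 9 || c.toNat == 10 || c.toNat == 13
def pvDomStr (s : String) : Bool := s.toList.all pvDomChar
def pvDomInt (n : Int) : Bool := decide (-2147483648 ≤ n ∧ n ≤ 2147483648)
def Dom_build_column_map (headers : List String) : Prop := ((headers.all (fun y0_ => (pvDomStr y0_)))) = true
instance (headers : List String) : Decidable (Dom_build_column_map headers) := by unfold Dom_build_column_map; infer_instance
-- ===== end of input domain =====

-- B drops A's intermediate normalized->original index dict and instead scans the headers
-- directly once per required column, keeping the last match (objective: simpler).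


-- ===== PORT A =====
def REQUIRED_COLUMNS : List String := ["name", "ip_address", "os_type", "status"]

-- c.strip().lower().replace(" ", "_")  (isinstance(c, str) is always true for List String)
def pvNorm (c : String) : String :=
  PySem.Str.replace (PySem.Str.lower (PySem.Str.strip c)) " " "_"

def normalize_columns (columns : List String) : List String :=
  columns.map pvNorm

def build_column_map (headers : List String) : List (String × String) :=
  let normalized := normalize_columns headers
  let actual_by_norm := (normalized.zip headers).foldl
    (fun (d : PySem.Dict String String) p => d.insert p.1 p.2) PySem.Dict.empty
  let col_map := REQUIRED_COLUMNS.foldl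
    (fun (m : PySem.Dict String String) req =>
      match actual_by_norm.get? req with
      | some v => m.insert req v
      | none => m) PySem.Dict.empty
  col_map.items

-- ===== PORT B =====
def build_column_map_alt (headers : List String) : List (String × String) :=
  REQUIRED_COLUMNS.foldl
    (fun (acc : List (String × String)) req =>
      match headers.foldl
          (fun (found : Option String) h => if pvNorm h == req then some h else found) none with
      | some h => acc ++ [(req, h)]
      | none => acc) []

-- ===== PRECONDITION & SPEC =====
def Spec_build_column_map (headers : List String) (out : List (String × String)) : Prop := out = build_column_map_alt headers
instance (headers : List String) (out : List (String × String)) : Decidable (Spec_build_column_map headers out) := by unfold Spec_build_column_map; infer_instance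

-- ===== CLAIM (what is proved, stated in full; the proofs are below) =====
def Claim_equal_build_column_map : Prop := ∀ (headers : List String), Dom_build_column_map headers → Spec_build_column_map headers (build_column_map headers)

-- ===== LEMMAS AND PROOFS =====

-- Lookup in the dict A builds from (normalized, original) pairs = B's last-match scan.
lemma get?_foldl_insert_norm (l : List String) (d : PySem.Dict String String) (k : String) :
    ((l.map (fun h => (pvNorm h, h))).foldl
        (fun (d : PySem.Dict String String) p => d.insert p.1 p.2) d).get? k
      = l.foldl (fun (found : Option String) h => if pvNorm h == k then some h else found)
          (d.get? k) := by
  induction l generalizing d with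
  | nil => rfl
  | cons h t ih =>
    simp only [List.map_cons, List.foldl_cons, ih]
    have hd : (d.insert (pvNorm h) h).get? k
        = if pvNorm h == k then some h else d.get? k := by
      rw [PySem.Dict.get?_insert]
      by_cases hk : k = pvNorm h
      · simp [hk]
      · have hbe : (pvNorm h == k) = false := by
          simpa [beq_iff_eq] using fun hh => hk hh.symm
        simp [hk, hbe]
    rw [hd]

-- A's required-columns loop over a dict with fresh distinct keys appends in order.
lemma items_foldl_req (actual : PySem.Dict String String) (reqs : List String)
    (m : PySem.Dict String String) (hnd : reqs.Nodup)
    (hfresh : ∀ r ∈ reqs, m.contains r = false) :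
    (reqs.foldl
        (fun (m : PySem.Dict String String) req =>
          match actual.get? req with
          | some v => m.insert req v
          | none => m) m).items
      = reqs.foldl
          (fun (acc : List (String × String)) req =>
            match actual.get? req with
            | some v => acc ++ [(req, v)]
            | none => acc) m.items := by
  induction reqs generalizing m with
  | nil => rfl
  | cons r rs ih =>
    simp only [List.foldl_cons]
    cases hget : actual.get? r with
    | none =>
      exact ih m hnd.of_cons (fun x hx => hfresh x (List.mem_cons_of_mem _ hx))
    | some v =>
      rw [ih (m.insert r v) hnd.of_cons, PySem.Dict.items_insert_of_not_contains _ _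
        (hfresh r (List.mem_cons_self ..))]
      intro x hx
      rw [PySem.Dict.contains_insert]
      have hxr : x ≠ r := fun h => (List.nodup_cons.mp hnd).1 (h ▸ hx)
      simp [hxr, hfresh x (List.mem_cons_of_mem _ hx)]

lemma zip_norm (headers : List String) :
    (headers.map pvNorm).zip headers = headers.map (fun h => (pvNorm h, h)) := by
  induction headers with
  | nil => rfl
  | cons h t ih => simp [ih]

-- ===== VERDICT (by name: the statement is the Claim_ definition above) =====
theorem build_column_map_spec : Claim_equal_build_column_map := by
  intro headers _
  unfold Spec_build_column_map build_column_map build_column_map_alt normalize_columns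
  dsimp only
  rw [zip_norm]
  rw [items_foldl_req _ _ _ (by decide) (fun r _ => PySem.Dict.contains_empty r)]
  have hfun : (fun (acc : List (String × String)) req =>
      match ((headers.map (fun h => (pvNorm h, h))).foldl
          (fun (d : PySem.Dict String String) p => d.insert p.1 p.2)
          PySem.Dict.empty).get? req with
      | some v => acc ++ [(req, v)]
      | none => acc)
    = (fun (acc : List (String × String)) req =>
      match headers.foldl
          (fun (found : Option String) h => if pvNorm h == req then some h else found) none with
      | some h => acc ++ [(req, h)]
      | none => acc) := by
    funext acc req
    rw [get?_foldl_insert_norm, PySem.Dict.get?_empty]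
  rw [hfun]
  rfl
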